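-- pv_equiv track=rewrite | github.com/prathmeshk-GlideCloud/GlideCloud-Tasks | Capstone Project/Smart Travel Planner/backend/app/services/constraint_solver.py | _categorize_place
-- ===== SOURCE A (Python) =====
-- from typing import List, Dict, Any, Optional, Set, Tuple
--
-- def _categorize_place(types: List[str]) -> str:
--     """Smart categorization"""
--     priority_map = [
--         (['museum', 'art_gallery'], 'museum'),
--         (['restaurant', 'cafe'], 'restaurant'),
--         (['park', 'natural_feature'], 'park'),
--         (['church', 'hindu_temple', 'place_of_worship'], 'religious_site'),
--         (['shopping_mall', 'store'], 'shopping'),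
--         (['tourist_attraction'], 'tourist_attraction'),
--     ]
--
--     for type_list, category in priority_map:
--         if any(t in types for t in type_list):
--             return category
--
--     return 'attraction'
-- ===== SOURCE B (Python) =====
-- _PRIORITY_MAP = [
--     (['museum', 'art_gallery'], 'museum'),
--     (['restaurant', 'cafe'], 'restaurant'),
--     (['park', 'natural_feature'], 'park'),
--     (['church', 'hindu_temple', 'place_of_worship'], 'religious_site'),
--     (['shopping_mall', 'store'], 'shopping'),
--     (['tourist_attraction'], 'tourist_attraction'),
-- ]
-- # reverse index: concrete type string -> (priority rank, category)
-- _TYPE_INDEX = {t: (i, cat)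
--                for i, (group, cat) in enumerate(_PRIORITY_MAP)
--                for t in group}
--
-- def _categorize_place(types):
--     """Smart categorization"""
--     best = None
--     for t in types:
--         entry = _TYPE_INDEX.get(t)
--         if entry is not None and (best is None or entry[0] < best[0]):
--             best = entry
--     return best[1] if best is not None else 'attraction'
-- ===== Notes on version B (the rewrite author's own statement) =====
-- stated objective: alternative
-- what changed: Replaces the scan over the fixed priority table with membership tests into `types` by a prebuilt reverse index (type string -> (rank, category)) and a single pass over `types` tracking the minimum-rank hit, defaulting to 'attraction'.
import Mathlib
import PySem

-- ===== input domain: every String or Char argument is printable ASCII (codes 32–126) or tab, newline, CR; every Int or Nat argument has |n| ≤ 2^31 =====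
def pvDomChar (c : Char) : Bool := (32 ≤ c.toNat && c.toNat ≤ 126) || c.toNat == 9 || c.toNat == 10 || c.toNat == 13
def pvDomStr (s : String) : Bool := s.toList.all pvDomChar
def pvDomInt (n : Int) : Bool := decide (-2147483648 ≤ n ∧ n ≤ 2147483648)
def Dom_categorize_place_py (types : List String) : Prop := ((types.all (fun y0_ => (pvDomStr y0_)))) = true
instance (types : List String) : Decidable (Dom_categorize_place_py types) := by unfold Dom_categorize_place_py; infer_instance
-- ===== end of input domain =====

-- B replaces A's scan of the priority table (membership test into `types` per group, first hit wins) by a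
-- prebuilt reverse index (type -> (rank, category)) and one minimum-rank pass over `types`; same cost, alternative decomposition.

-- ===== PORT A =====
def pvPriorityMapA : List (List String × String) :=
  [(["museum", "art_gallery"], "museum"),
   (["restaurant", "cafe"], "restaurant"),
   (["park", "natural_feature"], "park"),
   (["church", "hindu_temple", "place_of_worship"], "religious_site"),
   (["shopping_mall", "store"], "shopping"),
   (["tourist_attraction"], "tourist_attraction")]

def pvALoop (types : List String) : List (List String × String) → String
  | [] => "attraction"
  | (type_list, category) :: rest =>
      if type_list.any (fun t => types.contains t) then category else pvALoop types rest

def categorize_place_py (types : List String) : String := pvALoop types pvPriorityMapA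

-- ===== PORT B =====
def pvPriorityMapB : List (List String × String) :=
  [(["museum", "art_gallery"], "museum"),
   (["restaurant", "cafe"], "restaurant"),
   (["park", "natural_feature"], "park"),
   (["church", "hindu_temple", "place_of_worship"], "religious_site"),
   (["shopping_mall", "store"], "shopping"),
   (["tourist_attraction"], "tourist_attraction")]

-- {t: (i, cat) for i, (group, cat) in enumerate(_PRIORITY_MAP) for t in group}
def pvTypeIndex : PySem.Dict String (Int × String) :=
  (PySem.List.enumerate pvPriorityMapB 0).foldl
    (fun d p => p.2.1.foldl (fun d t => d.insert t (p.1, p.2.2)) d) PySem.Dict.empty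

def pvBStep (best : Option (Int × String)) (t : String) : Option (Int × String) :=
  match pvTypeIndex.get? t with
  | none => best
  | some entry =>
      match best with
      | none => some entry
      | some b => if entry.1 < b.1 then some entry else best

def categorize_place_py_alt (types : List String) : String :=
  match types.foldl pvBStep none with
  | some b => b.2
  | none => "attraction"

-- ===== PRECONDITION & SPEC =====
def Spec_categorize_place_py (types : List String) (out : String) : Prop := out = categorize_place_py_alt types
instance (types : List String) (out : String) : Decidable (Spec_categorize_place_py types out) := by unfold Spec_categorize_place_py; infer_instance

-- ===== CLAIM (what is proved, stated in full; the proofs are below) =====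
def Claim_equal_categorize_place_py : Prop := ∀ (types : List String), Dom_categorize_place_py types → Spec_categorize_place_py types (categorize_place_py types)

-- ===== LEMMAS AND PROOFS =====

def pvCat : Int → String
  | 0 => "museum" | 1 => "restaurant" | 2 => "park"
  | 3 => "religious_site" | 4 => "shopping" | _ => "tourist_attraction"

-- the rank an element of `types` gets from the reverse index
def pvRank? (t : String) : Option Int := (pvTypeIndex.get? t).map Prod.fst

set_option maxHeartbeats 1000000 in
lemma pvTypeIndex_eq : pvTypeIndex = PySem.Dict.mk
    [("museum", (0, "museum")), ("art_gallery", (0, "museum")),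
     ("restaurant", (1, "restaurant")), ("cafe", (1, "restaurant")),
     ("park", (2, "park")), ("natural_feature", (2, "park")),
     ("church", (3, "religious_site")), ("hindu_temple", (3, "religious_site")),
     ("place_of_worship", (3, "religious_site")),
     ("shopping_mall", (4, "shopping")), ("store", (4, "shopping")),
     ("tourist_attraction", (5, "tourist_attraction"))] := by rfl

lemma pvItems_mem (t : String) (e : Int × String) (h : pvTypeIndex.get? t = some e) :
    (t, e) ∈ [("museum", ((0:Int), "museum")), ("art_gallery", (0, "museum")),
     ("restaurant", (1, "restaurant")), ("cafe", (1, "restaurant")),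
     ("park", (2, "park")), ("natural_feature", (2, "park")),
     ("church", (3, "religious_site")), ("hindu_temple", (3, "religious_site")),
     ("place_of_worship", (3, "religious_site")),
     ("shopping_mall", (4, "shopping")), ("store", (4, "shopping")),
     ("tourist_attraction", (5, "tourist_attraction"))] := by
  rw [pvTypeIndex_eq] at h
  exact PySem.Dict.mem_items_of_get?_eq_some _ h

lemma pvShape (t : String) (e : Int × String) (h : pvTypeIndex.get? t = some e) :
    e.2 = pvCat e.1 ∧ 0 ≤ e.1 ∧ e.1 ≤ 5 := by
  have hm := pvItems_mem t e h
  simp only [List.mem_cons, List.not_mem_nil, or_false, Prod.mk.injEq] at hm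
  rcases hm with ⟨-,rfl⟩|⟨-,rfl⟩|⟨-,rfl⟩|⟨-,rfl⟩|⟨-,rfl⟩|⟨-,rfl⟩|⟨-,rfl⟩|⟨-,rfl⟩|⟨-,rfl⟩|⟨-,rfl⟩|⟨-,rfl⟩|⟨-,rfl⟩ <;>
    exact ⟨rfl, by norm_num, by norm_num⟩

lemma pvRank_eq_iff (t : String) (k : Int) :
    pvRank? t = some k ↔
      ((k = 0 ∧ (t = "museum" ∨ t = "art_gallery")) ∨
       (k = 1 ∧ (t = "restaurant" ∨ t = "cafe")) ∨
       (k = 2 ∧ (t = "park" ∨ t = "natural_feature")) ∨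
       (k = 3 ∧ (t = "church" ∨ t = "hindu_temple" ∨ t = "place_of_worship")) ∨
       (k = 4 ∧ (t = "shopping_mall" ∨ t = "store")) ∨
       (k = 5 ∧ t = "tourist_attraction")) := by
  constructor
  · intro h
    unfold pvRank? at h
    cases hg : pvTypeIndex.get? t with
    | none => rw [hg] at h; simp at h
    | some e =>
      rw [hg] at h
      simp only [Option.map_some, Option.some.injEq] at h
      have hm := pvItems_mem t e hg
      simp only [List.mem_cons, List.not_mem_nil, or_false, Prod.mk.injEq] at hm
      rcases hm with ⟨rfl,rfl⟩|⟨rfl,rfl⟩|⟨rfl,rfl⟩|⟨rfl,rfl⟩|⟨rfl,rfl⟩|⟨rfl,rfl⟩|⟨rfl,rfl⟩|⟨rfl,rfl⟩|⟨rfl,rfl⟩|⟨rfl,rfl⟩|⟨rfl,rfl⟩|⟨rfl,rfl⟩ <;> simp_all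
  · rintro (⟨rfl, rfl|rfl⟩|⟨rfl, rfl|rfl⟩|⟨rfl, rfl|rfl⟩|⟨rfl, rfl|rfl|rfl⟩|⟨rfl, rfl|rfl⟩|⟨rfl, rfl⟩) <;>
      (unfold pvRank?; rw [pvTypeIndex_eq]; decide)

-- pvPres i ts: some element of ts has rank i
def pvPres (i : Int) (ts : List String) : Prop := ∃ t ∈ ts, pvRank? t = some i

-- the merge the running minimum performs: keep the earlier entry unless the later one has strictly smaller rank
def pvMinO : Option (Int × String) → Option (Int × String) → Option (Int × String)
  | a, none => a
  | none, some e => some e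
  | some b, some e => if e.1 < b.1 then some e else some b

lemma pvMinO_none_left (a : Option (Int × String)) : pvMinO none a = a := by
  cases a <;> rfl

lemma pvMinO_none_right (a : Option (Int × String)) : pvMinO a none = a := rfl

lemma pvMinO_some_some (b e : Int × String) :
    pvMinO (some b) (some e) = if e.1 < b.1 then some e else some b := rfl

lemma pvBStep_eq (best : Option (Int × String)) (t : String) :
    pvBStep best t = pvMinO best (pvTypeIndex.get? t) := by
  cases h : pvTypeIndex.get? t <;> cases best <;> simp [pvBStep, h] <;> rfl

lemma pvMinO_assoc (a b c : Option (Int × String)) :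
    pvMinO (pvMinO a b) c = pvMinO a (pvMinO b c) := by
  cases a with
  | none => rw [pvMinO_none_left, pvMinO_none_left]
  | some x =>
    cases b with
    | none => rw [pvMinO_none_right, pvMinO_none_left]
    | some y =>
      cases c with
      | none => rw [pvMinO_none_right, pvMinO_none_right]
      | some z =>
        simp only [pvMinO_some_some]
        split_ifs <;> simp only [pvMinO_some_some] <;> split_ifs <;>
          first | rfl | (exfalso; omega)

lemma pvFold_eq (ts : List String) (best : Option (Int × String)) :
    ts.foldl pvBStep best = pvMinO best (ts.foldl pvBStep none) := by
  induction ts generalizing best with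
  | nil => cases best <;> rfl
  | cons t ts ih =>
    simp only [List.foldl_cons]
    rw [ih (pvBStep best t), ih (pvBStep none t), pvBStep_eq, pvBStep_eq none t,
        pvMinO_none_left, pvMinO_assoc]

def pvMins (ts : List String) : Option (Int × String) := ts.foldl pvBStep none

lemma pvMins_cons (t : String) (ts : List String) :
    pvMins (t :: ts) = pvMinO (pvTypeIndex.get? t) (pvMins ts) := by
  simp only [pvMins, List.foldl_cons]
  rw [pvFold_eq ts (pvBStep none t), pvBStep_eq, pvMinO_none_left]

lemma pvMins_none (ts : List String) (h : pvMins ts = none) : ∀ i, ¬ pvPres i ts := by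
  induction ts with
  | nil => rintro i ⟨t, ht, _⟩; simp at ht
  | cons t ts ih =>
    rw [pvMins_cons] at h
    rintro i ⟨u, hu, hru⟩
    cases hl : pvTypeIndex.get? t with
    | some e =>
      rw [hl] at h
      cases hm : pvMins ts with
      | none => rw [hm] at h; exact Option.some_ne_none _ h
      | some p =>
        rw [hm] at h
        simp only [pvMinO] at h
        split_ifs at h
    | none =>
      rw [hl, pvMinO_none_left] at h
      rcases List.mem_cons.mp hu with rfl | hu
      · unfold pvRank? at hru; rw [hl] at hru; simp at hru
      · exact ih h i ⟨u, hu, hru⟩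

lemma pvMins_some (ts : List String) (i : Int) (c : String) (h : pvMins ts = some (i, c)) :
    c = pvCat i ∧ 0 ≤ i ∧ i ≤ 5 ∧ pvPres i ts ∧ ∀ j, pvPres j ts → i ≤ j := by
  induction ts generalizing i c with
  | nil => simp [pvMins] at h
  | cons t ts ih =>
    rw [pvMins_cons] at h
    cases hl : pvTypeIndex.get? t with
    | none =>
      rw [hl, pvMinO_none_left] at h
      obtain ⟨hc, h0, h5, hpres, hmin⟩ := ih i c h
      refine ⟨hc, h0, h5,
        ⟨hpres.choose, List.mem_cons_of_mem _ hpres.choose_spec.1, hpres.choose_spec.2⟩, ?_⟩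
      rintro j ⟨u, hu, hru⟩
      rcases List.mem_cons.mp hu with rfl | hu
      · unfold pvRank? at hru; rw [hl] at hru; simp at hru
      · exact hmin j ⟨u, hu, hru⟩
    | some e =>
      obtain ⟨ei, ec⟩ := e
      obtain ⟨he, he0, he5⟩ := pvShape t (ei, ec) hl
      have hrt : pvRank? t = some ei := by unfold pvRank?; rw [hl]; rfl
      rw [hl] at h
      cases hm : pvMins ts with
      | none =>
        rw [hm] at h
        simp only [pvMinO, Option.some.injEq, Prod.mk.injEq] at h
        obtain ⟨rfl, rfl⟩ := h
        refine ⟨he, he0, he5, ⟨t, List.mem_cons_self, hrt⟩, ?_⟩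
        rintro j ⟨u, hu, hru⟩
        rcases List.mem_cons.mp hu with rfl | hu
        · rw [hrt] at hru; simp only [Option.some.injEq] at hru; omega
        · exact absurd ⟨u, hu, hru⟩ (pvMins_none ts hm j)
      | some p =>
        obtain ⟨pi, pc⟩ := p
        obtain ⟨hc', h0', h5', hpres', hmin'⟩ := ih pi pc (by rw [hm])
        rw [hm] at h
        simp only [pvMinO] at h
        by_cases hlt : pi < ei
        · rw [if_pos hlt] at h
          simp only [Option.some.injEq, Prod.mk.injEq] at h
          obtain ⟨rfl, rfl⟩ := h
          refine ⟨hc', h0', h5',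
            ⟨hpres'.choose, List.mem_cons_of_mem _ hpres'.choose_spec.1, hpres'.choose_spec.2⟩, ?_⟩
          rintro j ⟨u, hu, hru⟩
          rcases List.mem_cons.mp hu with rfl | hu
          · rw [hrt] at hru; simp only [Option.some.injEq] at hru; omega
          · exact hmin' j ⟨u, hu, hru⟩
        · rw [if_neg hlt] at h
          simp only [Option.some.injEq, Prod.mk.injEq] at h
          obtain ⟨rfl, rfl⟩ := h
          refine ⟨he, he0, he5, ⟨t, List.mem_cons_self, hrt⟩, ?_⟩
          rintro j ⟨u, hu, hru⟩
          rcases List.mem_cons.mp hu with rfl | hu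
          · rw [hrt] at hru; simp only [Option.some.injEq] at hru; omega
          · have := hmin' j ⟨u, hu, hru⟩; omega

-- A's group test for rank k is exactly "some element of types has rank k"
lemma pvAny_iff (types : List String) (g : List String) (k : Int)
    (hg : ∀ t, pvRank? t = some k ↔ t ∈ g) :
    (g.any (fun t => types.contains t) = true) ↔ pvPres k types := by
  simp only [List.any_eq_true, List.contains_iff_mem, pvPres]
  constructor
  · rintro ⟨x, hx, hx2⟩; exact ⟨x, hx2, (hg x).mpr hx⟩
  · rintro ⟨t, ht, hr⟩; exact ⟨t, (hg t).mp hr, ht⟩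

lemma pvRank_mem0 (t : String) : pvRank? t = some 0 ↔ t ∈ (["museum", "art_gallery"] : List String) := by
  rw [pvRank_eq_iff]; norm_num
lemma pvRank_mem1 (t : String) : pvRank? t = some 1 ↔ t ∈ (["restaurant", "cafe"] : List String) := by
  rw [pvRank_eq_iff]; norm_num
lemma pvRank_mem2 (t : String) : pvRank? t = some 2 ↔ t ∈ (["park", "natural_feature"] : List String) := by
  rw [pvRank_eq_iff]; norm_num
lemma pvRank_mem3 (t : String) : pvRank? t = some 3 ↔ t ∈ (["church", "hindu_temple", "place_of_worship"] : List String) := by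
  rw [pvRank_eq_iff]; norm_num
lemma pvRank_mem4 (t : String) : pvRank? t = some 4 ↔ t ∈ (["shopping_mall", "store"] : List String) := by
  rw [pvRank_eq_iff]; norm_num
lemma pvRank_mem5 (t : String) : pvRank? t = some 5 ↔ t ∈ (["tourist_attraction"] : List String) := by
  rw [pvRank_eq_iff]; norm_num

-- ===== VERDICT (by name: the statement is the Claim_ definition above) =====
theorem categorize_place_py_spec : Claim_equal_categorize_place_py := by
  intro types _
  unfold Spec_categorize_place_py
  have h0 := pvAny_iff types _ 0 pvRank_mem0
  have h1 := pvAny_iff types _ 1 pvRank_mem1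
  have h2 := pvAny_iff types _ 2 pvRank_mem2
  have h3 := pvAny_iff types _ 3 pvRank_mem3
  have h4 := pvAny_iff types _ 4 pvRank_mem4
  have h5 := pvAny_iff types _ 5 pvRank_mem5
  cases hm : pvMins types with
  | none =>
    have hb : categorize_place_py_alt types = "attraction" := by
      unfold categorize_place_py_alt
      rw [show types.foldl pvBStep none = pvMins types from rfl, hm]
    have hnone := pvMins_none types hm
    have e0 : (["museum", "art_gallery"].any (fun t => types.contains t)) = false :=
      Bool.eq_false_iff.mpr fun hh => hnone 0 (h0.mp hh)
    have e1 : (["restaurant", "cafe"].any (fun t => types.contains t)) = false :=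
      Bool.eq_false_iff.mpr fun hh => hnone 1 (h1.mp hh)
    have e2 : (["park", "natural_feature"].any (fun t => types.contains t)) = false :=
      Bool.eq_false_iff.mpr fun hh => hnone 2 (h2.mp hh)
    have e3 : (["church", "hindu_temple", "place_of_worship"].any (fun t => types.contains t)) = false :=
      Bool.eq_false_iff.mpr fun hh => hnone 3 (h3.mp hh)
    have e4 : (["shopping_mall", "store"].any (fun t => types.contains t)) = false :=
      Bool.eq_false_iff.mpr fun hh => hnone 4 (h4.mp hh)
    have e5 : (["tourist_attraction"].any (fun t => types.contains t)) = false :=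
      Bool.eq_false_iff.mpr fun hh => hnone 5 (h5.mp hh)
    rw [hb]
    show pvALoop types pvPriorityMapA = _
    simp only [pvPriorityMapA, pvALoop]
    rw [e0, e1, e2, e3, e4, e5]
    simp
  | some p =>
    obtain ⟨i, c⟩ := p
    have hb : categorize_place_py_alt types = c := by
      unfold categorize_place_py_alt
      rw [show types.foldl pvBStep none = pvMins types from rfl, hm]
    obtain ⟨hc, hi0, hi5, hpres, hmin⟩ := pvMins_some types i c hm
    rw [hb]
    show pvALoop types pvPriorityMapA = c
    simp only [pvPriorityMapA, pvALoop]
    interval_cases i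
    · rw [if_pos (h0.mpr hpres)]; rw [hc]; rfl
    · rw [if_neg (fun hh => absurd (hmin 0 (h0.mp hh)) (by norm_num)),
          if_pos (h1.mpr hpres)]; rw [hc]; rfl
    · rw [if_neg (fun hh => absurd (hmin 0 (h0.mp hh)) (by norm_num)),
          if_neg (fun hh => absurd (hmin 1 (h1.mp hh)) (by norm_num)),
          if_pos (h2.mpr hpres)]; rw [hc]; rfl
    · rw [if_neg (fun hh => absurd (hmin 0 (h0.mp hh)) (by norm_num)),
          if_neg (fun hh => absurd (hmin 1 (h1.mp hh)) (by norm_num)),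
          if_neg (fun hh => absurd (hmin 2 (h2.mp hh)) (by norm_num)),
          if_pos (h3.mpr hpres)]; rw [hc]; rfl
    · rw [if_neg (fun hh => absurd (hmin 0 (h0.mp hh)) (by norm_num)),
          if_neg (fun hh => absurd (hmin 1 (h1.mp hh)) (by norm_num)),
          if_neg (fun hh => absurd (hmin 2 (h2.mp hh)) (by norm_num)),
          if_neg (fun hh => absurd (hmin 3 (h3.mp hh)) (by norm_num)),
          if_pos (h4.mpr hpres)]; rw [hc]; rfl
    · rw [if_neg (fun hh => absurd (hmin 0 (h0.mp hh)) (by norm_num)),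
          if_neg (fun hh => absurd (hmin 1 (h1.mp hh)) (by norm_num)),
          if_neg (fun hh => absurd (hmin 2 (h2.mp hh)) (by norm_num)),
          if_neg (fun hh => absurd (hmin 3 (h3.mp hh)) (by norm_num)),
          if_neg (fun hh => absurd (hmin 4 (h4.mp hh)) (by norm_num)),
          if_pos (h5.mpr hpres)]; rw [hc]; rfl
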